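-- pv_equiv track=rewrite | github.com/Phfish1/Skole-Dokumentasjon | innledende_oppgaver/sandbox/splitting_and_splicing/homemade_splitter.py | homemade_splitter
-- ===== SOURCE A (Python) =====
-- def homemade_splitter(main_string, splitting_character):
--     for i in range(0, len(main_string)):
--
--         current_checking_string = ""
--         for j in range(0, len(splitting_character)):
--             if i + j < len(main_string):
--                 current_checking_string += main_string[i + j]
--
--
--         if current_checking_string == splitting_character:
--             start_of_split = i
--             end_of_split = i + len(splitting_character)
--
--             ### EZ GAME :)
--             first_string = homemade_slicer(main_string, 0, start_of_split) #first_string = main_string[0: start_of_split]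
--             last_string = homemade_slicer(main_string, end_of_split, len(main_string)) #last_string = main_string[end_of_split: len(main_string)]
--
--             return [first_string, last_string]
--
-- def homemade_slicer(main_string, slice_start, slice_end):
--
--     sliced_string = ""
--     for i in range(0, len(main_string)):
--         if i >= slice_start and i < slice_end:
--             sliced_string += main_string[i]
--
--     return sliced_string
-- ===== SOURCE B (Python) =====
-- def homemade_splitter(main_string, splitting_character):
--     idx = main_string.find(splitting_character)
--     if idx == -1:
--         return None
--     return [main_string[:idx], main_string[idx + len(splitting_character):]]
-- ===== Notes on version B (the rewrite author's own statement) =====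
-- stated objective: faster
-- what changed: Replaces the nested scan (rebuilding an m-char window at every position) and the hand-rolled character-copy slicer with a single str.find plus direct slicing.
-- intended difference: On the single input ('',''), A's outer loop never runs and it returns None although the empty separator occurs at index 0; B returns ['',''] (the value Python's ''.split-at-find semantics gives), which is the intended split. — e.g. on homemade_splitter("", ""): A returns none, B returns some ["", ""]
import Mathlib
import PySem

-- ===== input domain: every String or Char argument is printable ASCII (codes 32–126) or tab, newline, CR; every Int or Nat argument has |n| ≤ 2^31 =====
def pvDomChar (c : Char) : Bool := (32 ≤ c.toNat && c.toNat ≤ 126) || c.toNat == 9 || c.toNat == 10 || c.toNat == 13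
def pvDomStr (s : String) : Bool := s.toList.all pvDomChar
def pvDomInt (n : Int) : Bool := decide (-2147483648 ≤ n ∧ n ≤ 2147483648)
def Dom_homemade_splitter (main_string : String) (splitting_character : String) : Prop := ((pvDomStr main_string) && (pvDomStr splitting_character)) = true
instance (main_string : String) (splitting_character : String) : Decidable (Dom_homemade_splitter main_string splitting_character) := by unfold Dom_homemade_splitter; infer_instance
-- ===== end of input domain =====

-- B replaces A's nested position-by-position window rebuild and hand-rolled char-copy slicer
-- with one substring search (str.find) plus direct slicing (objective: faster).

-- ===== PORT A =====
-- 'sliced_string += main_string[i]' collected over range(0, len(main_string)), guarded by slice_start <= i < slice_end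
def homemade_slicer (main_string : String) (slice_start : Int) (slice_end : Int) : String :=
  String.ofList ((PySem.List.pyRange 0 main_string.toList.length 1).foldl
    (fun acc i => if slice_start ≤ i ∧ i < slice_end
                  then acc ++ [PySem.List.pyGetD main_string.toList i ' '] else acc) [])

-- the inner loop: current_checking_string built from main_string[i+j], j in range(0, len(splitting_character)), clipped at the end
def hsInner (s : List Char) (sep : List Char) (i : Int) : List Char :=
  (PySem.List.pyRange 0 sep.length 1).foldl
    (fun acc j => if i + j < s.length then acc ++ [PySem.List.pyGetD s (i + j) ' '] else acc) []

-- the outer for-loop with its early return (falls off the end -> None)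
def hsLoop (ms : String) (sc : String) (is_ : List Int) : Option (List String) :=
  match is_ with
  | [] => none
  | i :: rest =>
    if hsInner ms.toList sc.toList i = sc.toList then
      some [homemade_slicer ms 0 i,
            homemade_slicer ms (i + sc.toList.length) ms.toList.length]
    else hsLoop ms sc rest

def homemade_splitter (main_string : String) (splitting_character : String) : Option (List String) :=
  hsLoop main_string splitting_character (PySem.List.pyRange 0 main_string.toList.length 1)

-- ===== PORT B =====
def homemade_splitter_alt (main_string : String) (splitting_character : String) : Option (List String) :=
  let idx := PySem.Str.find main_string splitting_character
  if idx = -1 then none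
  else some [PySem.Str.slice main_string none (some idx),
             PySem.Str.slice main_string (some (idx + PySem.Str.len splitting_character)) none]

-- ===== PRECONDITION & SPEC =====
-- On the single input ('',''), A's outer loop never runs and it returns None although the
-- empty separator occurs at index 0; B returns ['',''], the intended split.
def D_homemade_splitter (main_string : String) (splitting_character : String) : Prop :=
  main_string = "" ∧ splitting_character = ""
instance (main_string : String) (splitting_character : String) : Decidable (D_homemade_splitter main_string splitting_character) := by unfold D_homemade_splitter; infer_instance

def Spec_homemade_splitter (main_string : String) (splitting_character : String) (out : Option (List String)) : Prop := ¬ D_homemade_splitter main_string splitting_character → out = homemade_splitter_alt main_string splitting_character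
instance (main_string : String) (splitting_character : String) (out : Option (List String)) : Decidable (Spec_homemade_splitter main_string splitting_character out) := by unfold Spec_homemade_splitter; infer_instance

def pvDiffWitness_homemade_splitter : String × String := ("", "")
def pvDiffWitnessOut_homemade_splitter : (Option (List String)) × (Option (List String)) := (none, some ["", ""])

-- ===== CLAIM (what is proved, stated in full; the proofs are below) =====
def Claim_unchanged_homemade_splitter : Prop := ∀ (main_string : String) (splitting_character : String), Dom_homemade_splitter main_string splitting_character → Spec_homemade_splitter main_string splitting_character (homemade_splitter main_string splitting_character)
def Claim_changed_homemade_splitter : Prop := Dom_homemade_splitter (pvDiffWitness_homemade_splitter.1) (pvDiffWitness_homemade_splitter.2) ∧ D_homemade_splitter (pvDiffWitness_homemade_splitter.1) (pvDiffWitness_homemade_splitter.2) ∧ homemade_splitter (pvDiffWitness_homemade_splitter.1) (pvDiffWitness_homemade_splitter.2) = pvDiffWitnessOut_homemade_splitter.1 ∧ homemade_splitter_alt (pvDiffWitness_homemade_splitter.1) (pvDiffWitness_homemade_splitter.2) = pvDiffWitnessOut_homemade_splitter.2 ∧ pvDiffWitnessOut_homemade_splitter.1 ≠ pvDiffWitn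essOut_homemade_splitter.2
def Claim_exact_homemade_splitter : Prop := ∀ (main_string : String) (splitting_character : String), Dom_homemade_splitter main_string splitting_character → D_homemade_splitter main_string splitting_character → homemade_splitter main_string splitting_character ≠ homemade_splitter_alt main_string splitting_character

-- ===== LEMMAS AND PROOFS =====

-- A's inner window equals take-after-drop
lemma inner_gen (s : List Char) (m i : Nat) :
    (PySem.List.pyRange 0 (m : Int) 1).foldl
      (fun acc j => if (i : Int) + j < s.length then acc ++ [PySem.List.pyGetD s ((i : Int) + j) ' '] else acc) []
    = (s.drop i).take m := by
  induction m with
  | zero => simp [PySem.List.pyRange]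
  | succ m ih =>
    rw [show ((m + 1 : Nat) : Int) = (m : Int) + 1 by push_cast; ring,
        PySem.List.pyRange_one_succ_right (by positivity), List.foldl_append]
    rw [ih, List.take_add_one]
    simp only [List.foldl_cons, List.foldl_nil]
    by_cases h : i + m < s.length
    · rw [if_pos (by omega)]
      rw [show (i : Int) + (m : Int) = ((i + m : Nat) : Int) by push_cast; ring]
      rw [PySem.List.pyGetD_natCast]
      rw [List.getElem?_drop]
      rw [List.getElem?_eq_getElem (by omega)]
      simp [List.getD, List.getElem?_eq_getElem h]
    · rw [if_neg (by omega)]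
      rw [List.getElem?_drop, List.getElem?_eq_none (by simpa using by omega)]
      simp

lemma hsInner_eq (s : List Char) (sep : List Char) (i : Nat) :
    hsInner s sep (i : Int) = (s.drop i).take sep.length := by
  unfold hsInner; exact inner_gen s sep.length i

-- A's hand-rolled slicer is take-after-drop
lemma slicer_gen (s : List Char) (a b : Nat) :
    (PySem.List.pyRange 0 (s.length : Int) 1).foldl
      (fun acc i => if (a : Int) ≤ i ∧ i < (b : Int) then acc ++ [PySem.List.pyGetD s i ' '] else acc) []
    = (s.drop a).take (b - a) := by
  induction s using List.reverseRecOn with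
  | nil => simp [PySem.List.pyRange]
  | append_singleton s c ih =>
    rw [show ((s ++ [c]).length : Int) = (s.length : Int) + 1 by simp,
        PySem.List.pyRange_one_succ_right (by positivity), List.foldl_append]
    have hinner : (PySem.List.pyRange 0 (s.length : Int) 1).foldl
        (fun acc i => if (a : Int) ≤ i ∧ i < (b : Int) then acc ++ [PySem.List.pyGetD (s ++ [c]) i ' '] else acc) []
        = (s.drop a).take (b - a) := by
      rw [PySem.List.foldl_congr_mem _ _
            (fun acc i => if (a : Int) ≤ i ∧ i < (b : Int) then acc ++ [PySem.List.pyGetD s i ' '] else acc) _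
            (by
              intro acc i hi
              obtain ⟨h0, hlt⟩ := (PySem.List.mem_pyRange_one).1 hi
              congr 1
              obtain ⟨k, rfl⟩ : ∃ k : Nat, i = (k : Int) := ⟨i.toNat, by omega⟩
              rw [PySem.List.pyGetD_natCast, PySem.List.pyGetD_natCast,
                  List.getD_append _ _ _ _ (by exact_mod_cast hlt)]),
          ih]
    rw [hinner]
    simp only [List.foldl_cons, List.foldl_nil]
    by_cases hc : (a : Int) ≤ (s.length : Int) ∧ (s.length : Int) < (b : Int)
    · rw [if_pos hc]
      have ha : a ≤ s.length := by exact_mod_cast hc.1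
      have hb : s.length < b := by exact_mod_cast hc.2
      rw [show ((s.length : Int)) = ((s.length : Nat) : Int) by norm_num, PySem.List.pyGetD_natCast,
          List.getD_eq_getElem _ _ (by simp), List.drop_append_of_le_length ha]
      rw [List.take_of_length_le (by simp; omega), List.take_of_length_le (by simp; omega)]
      simp
    · rw [if_neg hc]
      by_cases ha : a ≤ s.length
      · have hb : b ≤ s.length := by omega
        rw [List.drop_append_of_le_length ha, List.take_append_of_le_length (by simp; omega)]
      · have h1 : (s ++ [c]).length ≤ a := by simp; omega
        rw [List.drop_of_length_le h1, List.drop_of_length_le (by omega)]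

lemma slicer_eq (ms : String) (a b : Nat) :
    homemade_slicer ms (a : Int) (b : Int) = String.ofList ((ms.toList.drop a).take (b - a)) := by
  unfold homemade_slicer; rw [slicer_gen]

-- the loop's test at index i succeeds iff the separator is a prefix of the suffix at i
lemma test_iff (s sep : List Char) (i : Nat) :
    hsInner s sep (i : Int) = sep ↔ sep <+: s.drop i := by
  rw [hsInner_eq]
  constructor
  · intro h; exact List.prefix_iff_eq_take.2 h.symm
  · intro h; exact (List.prefix_iff_eq_take.1 h).symm

-- no match anywhere -> the loop falls off the end
lemma loop_none (ms sc : String) (h : ∀ j : Nat, ¬ sc.toList <+: ms.toList.drop j)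
    (is_ : List Int) (hpos : ∀ i ∈ is_, 0 ≤ i) : hsLoop ms sc is_ = none := by
  induction is_ with
  | nil => rfl
  | cons i rest ih =>
    unfold hsLoop
    obtain ⟨k, rfl⟩ : ∃ k : Nat, i = (k : Int) := ⟨i.toNat, by have := hpos i (by simp); omega⟩
    rw [if_neg (fun hc => h k ((test_iff _ _ _).1 hc))]
    exact ih (fun j hj => hpos j (by simp [hj]))

-- first match at k -> the loop, started anywhere at or below k, returns the split at k
lemma loop_found (ms sc : String) (k : Nat)
    (hk : sc.toList <+: ms.toList.drop k)
    (hmin : ∀ j < k, ¬ sc.toList <+: ms.toList.drop j)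
    (hkn : k < ms.toList.length) :
    ∀ a : Nat, a ≤ k →
      hsLoop ms sc (PySem.List.pyRange (a : Int) (ms.toList.length : Int) 1) =
        some [homemade_slicer ms 0 (k : Int),
              homemade_slicer ms ((k : Int) + sc.toList.length) ms.toList.length] := by
  intro a ha
  induction hd : k - a generalizing a with
  | zero =>
    have : a = k := by omega
    subst this
    rw [PySem.List.pyRange_one_cons (by exact_mod_cast hkn)]
    unfold hsLoop
    rw [if_pos ((test_iff _ _ _).2 hk)]
  | succ d ih =>
    rw [PySem.List.pyRange_one_cons (by exact_mod_cast (show a < ms.toList.length by omega))]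
    unfold hsLoop
    rw [if_neg (fun hc => hmin a (by omega) ((test_iff _ _ _).1 hc))]
    rw [show ((a : Int) + 1) = ((a + 1 : Nat) : Int) by push_cast; ring]
    exact ih (a + 1) (by omega) (by omega)

theorem homemade_splitter_spec : Claim_unchanged_homemade_splitter := by
  intro ms sc _ hD
  unfold homemade_splitter homemade_splitter_alt
  by_cases hfind : PySem.Str.find ms sc = -1
  · -- no occurrence: both sides are None
    rw [hfind, if_pos rfl]
    have hninf : ¬ sc.toList <:+: ms.toList := by
      rw [PySem.Str.find_eq] at hfind
      exact (PySem.Chars.find_eq_neg_one_iff _ _).1 hfind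
    refine loop_none ms sc (fun j hj => ?_) _ (fun i hi => ((PySem.List.mem_pyRange_one).1 hi).1)
    exact hninf ((PySem.Chars.isIn_iff_infix _ _).1
      ((PySem.Chars.exists_prefix_drop_iff_isIn _ _).1 ⟨j, hj⟩))
  · -- first occurrence: the loop returns at index k = find(ms, sc)
    rw [if_neg hfind]
    rw [PySem.Str.find_eq] at hfind
    have hnn : 0 ≤ PySem.Chars.find ms.toList sc.toList := by
      have h1 := PySem.Chars.neg_one_le_find ms.toList sc.toList
      omega
    obtain ⟨hpre, hmin⟩ := PySem.Chars.find_spec hnn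
    obtain ⟨k, hkfind⟩ : ∃ k : Nat, PySem.Chars.find ms.toList sc.toList = (k : Int) :=
      ⟨(PySem.Chars.find ms.toList sc.toList).toNat, by omega⟩
    rw [hkfind] at hpre hmin
    simp only [Int.toNat_natCast] at hpre hmin
    have hkm : k + sc.toList.length ≤ ms.toList.length := by
      have h1 := hpre.length_le
      have h2 := PySem.Chars.find_le_length ms.toList sc.toList
      rw [hkfind] at h2
      simp only [List.length_drop] at h1
      omega
    have hkn : k < ms.toList.length := by
      rcases Nat.eq_zero_or_pos sc.toList.length with hp0 | hp0
      · -- separator is empty: sc = "" and (by ¬D_) ms ≠ "", and k = 0 by minimality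
        have hplist : sc.toList = [] := List.length_eq_zero_iff.1 hp0
        have hsc : sc = "" := String.toList_inj.1 (by simpa using hplist)
        have hms : ms ≠ "" := fun h => hD ⟨h, hsc⟩
        have hsne : ms.toList ≠ [] := fun h => hms (String.toList_inj.1 (by simpa using h))
        have hlen : 0 < ms.toList.length := List.length_pos_of_ne_nil hsne
        have hk0 : k = 0 := by
          by_contra hne
          exact (hmin 0 (by omega)) (hplist ▸ List.nil_prefix)
        omega
      · omega
    have hloop := loop_found ms sc k hpre hmin hkn 0 (Nat.zero_le _)
    rw [Nat.cast_zero] at hloop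
    rw [PySem.Str.find_eq, hkfind, hloop]
    have e1 : homemade_slicer ms 0 (k : Int) = PySem.Str.slice ms none (some (k : Int)) := by
      have h := slicer_eq ms 0 k
      rw [Nat.cast_zero] at h
      rw [h, ← String.toList_inj, PySem.Str.toList_slice]
      simp only [PySem.Chars.slice_eq_listSlice, PySem.List.slice_to_natCast]
      simp
    have e2 : homemade_slicer ms ((k : Int) + sc.toList.length) ms.toList.length =
        PySem.Str.slice ms (some ((k : Int) + PySem.Str.len sc)) none := by
      have hcast : ((k : Int) + (sc.toList.length : Int)) = ((k + sc.toList.length : Nat) : Int) := by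
        push_cast; ring
      have hlen : PySem.Str.len sc = (sc.toList.length : Int) := by
        simp [PySem.Str.len_eq]
      rw [hlen, hcast, show ((ms.toList.length : Int)) = ((ms.toList.length : Nat) : Int) from rfl,
          slicer_eq, ← String.toList_inj, PySem.Str.toList_slice]
      simp only [PySem.Chars.slice_eq_listSlice, PySem.List.slice_from_natCast]
      rw [List.take_of_length_le (by simp)]
      simp
    rw [e1, e2]

theorem homemade_splitter_changed : Claim_changed_homemade_splitter := by
  unfold Claim_changed_homemade_splitter; decide

theorem homemade_splitter_tight : Claim_exact_homemade_splitter := by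
  intro ms sc _ hD
  obtain ⟨h1, h2⟩ := hD; subst h1; subst h2; decide
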